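-- pv_equiv track=rewrite | github.com/fong57/AI-News-v2 | src/litenews/workflow/fact_check_diff.py | lines_spanned_by_char_range
-- ===== SOURCE A (Python) =====
-- def lines_spanned_by_char_range(
--     start: int, end: int, offsets: list[int], lines: list[str]
-- ) -> frozenset[int]:
--     """Line indices whose character span intersects [start, end)."""
--     out: set[int] = set()
--     for i, off in enumerate(offsets):
--         line_end = off + len(lines[i])
--         if line_end > start and off < end:
--             out.add(i)
--     return frozenset(out)
-- ===== SOURCE B (Python) =====
-- def lines_spanned_by_char_range(start, end, offsets, lines):
--     """Line indices whose character span intersects [start, end).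
--
--     Complement formulation: a line misses the range iff it ends at/before
--     `start` or begins at/after `end`; collect both kinds of misses and
--     subtract them from the full index set.
--     """
--     n = len(offsets)
--     ends_before = {i for i in range(n) if offsets[i] + len(lines[i]) <= start}
--     starts_after = {i for i in range(n) if offsets[i] >= end}
--     bad = ends_before | starts_after
--     return frozenset(i for i in range(n) if i not in bad)
-- ===== Notes on version B (the rewrite author's own statement) =====
-- stated objective: alternative
-- what changed: B replaces A's single forward scan testing intersection directly with a De Morgan complement computation: two passes collect the indices that miss the range (ending before start, starting after end), and the result is the full index set minus their union.
import Mathlib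
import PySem

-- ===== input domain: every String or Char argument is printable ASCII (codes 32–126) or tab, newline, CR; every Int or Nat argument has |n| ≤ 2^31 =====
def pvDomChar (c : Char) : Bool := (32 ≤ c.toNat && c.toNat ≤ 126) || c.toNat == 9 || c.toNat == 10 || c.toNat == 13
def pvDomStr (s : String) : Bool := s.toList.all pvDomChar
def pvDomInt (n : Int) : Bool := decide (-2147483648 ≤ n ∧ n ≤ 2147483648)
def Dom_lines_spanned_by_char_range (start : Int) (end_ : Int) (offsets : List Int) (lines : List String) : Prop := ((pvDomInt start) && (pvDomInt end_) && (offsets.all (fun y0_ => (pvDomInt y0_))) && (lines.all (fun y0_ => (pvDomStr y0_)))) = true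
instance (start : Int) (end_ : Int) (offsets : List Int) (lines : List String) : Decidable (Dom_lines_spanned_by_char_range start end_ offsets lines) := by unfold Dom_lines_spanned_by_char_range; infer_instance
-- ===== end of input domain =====

-- B computes the same answer by a De Morgan complement (two miss-passes, then full \ (their union)) instead of A's direct intersection scan; same O(n) cost, return value only.

-- ===== PORT A =====
def lines_spanned_by_char_range (start : Int) (end_ : Int) (offsets : List Int) (lines : List String) : List Int :=
  (PySem.List.enumerate offsets).foldl
    (fun (out : PySem.Set Int) p =>
      let line_end := p.2 + PySem.Str.len (PySem.List.pyGetD lines p.1 "")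
      if line_end > start ∧ p.2 < end_ then PySem.Set.add out p.1 else out)
    PySem.Set.empty

-- ===== PORT B =====
def lines_spanned_by_char_range_alt (start : Int) (end_ : Int) (offsets : List Int) (lines : List String) : List Int :=
  let n : Int := offsets.length
  let ends_before : PySem.Set Int :=
    PySem.Set.ofList ((PySem.List.pyRange 0 n 1).filter
      (fun i => decide (PySem.List.pyGetD offsets i 0 + PySem.Str.len (PySem.List.pyGetD lines i "") ≤ start)))
  let starts_after : PySem.Set Int :=
    PySem.Set.ofList ((PySem.List.pyRange 0 n 1).filter
      (fun i => decide (end_ ≤ PySem.List.pyGetD offsets i 0)))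
  let bad : PySem.Set Int := PySem.Set.union ends_before starts_after
  PySem.Set.ofList ((PySem.List.pyRange 0 n 1).filter (fun i => !(PySem.Set.contains bad i)))

-- ===== PRECONDITION & SPEC =====
-- Pre_ excludes exactly the inputs where the Python A raises IndexError (fewer lines than offsets); B raises there too.
def Pre_lines_spanned_by_char_range (start : Int) (end_ : Int) (offsets : List Int) (lines : List String) : Prop :=
  offsets.length ≤ lines.length
instance (start : Int) (end_ : Int) (offsets : List Int) (lines : List String) : Decidable (Pre_lines_spanned_by_char_range start end_ offsets lines) := by unfold Pre_lines_spanned_by_char_range; infer_instance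
def pvWitness_lines_spanned_by_char_range : Int × Int × List Int × List String := (1, 5, [0, 3], ["abc", "de"])

def Spec_lines_spanned_by_char_range (start : Int) (end_ : Int) (offsets : List Int) (lines : List String) (out : List Int) : Prop := out = lines_spanned_by_char_range_alt start end_ offsets lines
instance (start : Int) (end_ : Int) (offsets : List Int) (lines : List String) (out : List Int) : Decidable (Spec_lines_spanned_by_char_range start end_ offsets lines out) := by unfold Spec_lines_spanned_by_char_range; infer_instance

-- ===== CLAIM (what is proved, stated in full; the proofs are below) =====
def Claim_equal_lines_spanned_by_char_range : Prop := ∀ (start : Int) (end_ : Int) (offsets : List Int) (lines : List String), Dom_lines_spanned_by_char_range start end_ offsets lines → Pre_lines_spanned_by_char_range start end_ offsets lines → Spec_lines_spanned_by_char_range start end_ offsets lines (lines_spanned_by_char_range start end_ offsets lines)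

-- ===== LEMMAS AND PROOFS =====

theorem A_eq_filter (start end_ : Int) (offsets : List Int) (lines : List String) :
    lines_spanned_by_char_range start end_ offsets lines =
      (PySem.List.pyRange 0 (offsets.length : Int) 1).filter
        (fun i => decide (PySem.List.pyGetD offsets i 0 + PySem.Str.len (PySem.List.pyGetD lines i "") > start ∧ PySem.List.pyGetD offsets i 0 < end_)) := by
  unfold lines_spanned_by_char_range
  rw [PySem.List.enumerate_eq_map_pyRange (d := 0), List.foldl_map]
  rw [PySem.List.foldl_ite_eq_foldl_filter]
  simp only [PySem.List.len_eq]
  exact PySem.Set.ofList_eq_self_of_nodup _ ((PySem.List.nodup_pyRange_one 0 _).filter _)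

theorem B_eq_filter (start end_ : Int) (offsets : List Int) (lines : List String) :
    lines_spanned_by_char_range_alt start end_ offsets lines =
      (PySem.List.pyRange 0 (offsets.length : Int) 1).filter
        (fun i => decide (PySem.List.pyGetD offsets i 0 + PySem.Str.len (PySem.List.pyGetD lines i "") > start ∧ PySem.List.pyGetD offsets i 0 < end_)) := by
  unfold lines_spanned_by_char_range_alt
  simp only []
  rw [PySem.Set.ofList_eq_self_of_nodup _ ((PySem.List.nodup_pyRange_one 0 _).filter _)]
  apply List.filter_congr
  intro i hi
  have hbad : (PySem.Set.contains
      (PySem.Set.union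
        (PySem.Set.ofList ((PySem.List.pyRange 0 (offsets.length : Int) 1).filter
          (fun i => decide (PySem.List.pyGetD offsets i 0 + PySem.Str.len (PySem.List.pyGetD lines i "") ≤ start))))
        (PySem.Set.ofList ((PySem.List.pyRange 0 (offsets.length : Int) 1).filter
          (fun i => decide (end_ ≤ PySem.List.pyGetD offsets i 0))))) i = true) ↔
      (PySem.List.pyGetD offsets i 0 + PySem.Str.len (PySem.List.pyGetD lines i "") ≤ start ∨ end_ ≤ PySem.List.pyGetD offsets i 0) := by
    rw [PySem.Set.contains_iff, PySem.Set.mem_union]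
    simp [PySem.Set.mem_ofList, List.mem_filter, hi]
  cases hc : PySem.Set.contains _ i
  · rw [hc] at hbad
    simp only [Bool.false_eq_true, false_iff] at hbad
    push Not at hbad
    simp only [Bool.not_false]
    symm
    rw [decide_eq_true_eq]
    exact ⟨by omega, by omega⟩
  · rw [hc] at hbad
    simp only [true_iff] at hbad
    simp only [Bool.not_true]
    symm
    rw [decide_eq_false_iff_not]
    rintro ⟨h1, h2⟩
    omega

-- ===== VERDICT (by name: the statement is the Claim_ definition above) =====
theorem lines_spanned_by_char_range_spec : Claim_equal_lines_spanned_by_char_range := by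
  intro start end_ offsets lines _ _
  unfold Spec_lines_spanned_by_char_range
  rw [A_eq_filter, B_eq_filter]
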